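-- pv_equiv track=rewrite | github.com/Ashish-dwi99/Engram | scripts/generate_deep_docs.py | _group_for_index
-- ===== SOURCE A (Python) =====
-- from collections import defaultdict
-- from typing import Any, Dict, List, Tuple
--
-- def _group_for_index(items: List[Dict[str, Any]]) -> Dict[str, List[Dict[str, Any]]]:
--     groups: Dict[str, List[Dict[str, Any]]] = defaultdict(list)
--
--     for item in items:
--         path = item["source_path"]
--         parts = path.split("/")
--
--         if path.startswith("engram/") and len(parts) >= 2:
--             group = f"engram/{parts[1]}"
--         elif path.startswith("plugins/engram-memory/") and len(parts) >= 3: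
--             group = f"plugins/engram-memory/{parts[2]}"
--         else:
--             group = "root"
--
--         groups[group].append(item)
--
--     for value in groups.values():
--         value.sort(key=lambda item: item["source_path"])
--
--     return dict(sorted(groups.items(), key=lambda item: item[0]))
-- ===== SOURCE B (Python) =====
-- def _group_for_index(items):
--     def group_key(item):
--         path = item["source_path"]
--         parts = path.split("/")
--         if path.startswith("engram/") and len(parts) >= 2:
--             return f"engram/{parts[1]}"
--         if path.startswith("plugins/engram-memory/") and len(parts) >= 3:
--             return f"plugins/engram-memory/{parts[2]}"
--         return "root"
--
--     return {
--         key: sorted((item for item in items if group_key(item) == key),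
--                     key=lambda item: item["source_path"])
--         for key in sorted({group_key(item) for item in items})
--     }
-- ===== Notes on version B (the rewrite author's own statement) =====
-- stated objective: simpler
-- what changed: Replaces A's defaultdict-accumulation loop followed by in-place per-group sorts and a final key-sort of the dict with a single dict comprehension over the sorted set of distinct group keys, filtering and sorting each group's items directly.
import Mathlib
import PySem

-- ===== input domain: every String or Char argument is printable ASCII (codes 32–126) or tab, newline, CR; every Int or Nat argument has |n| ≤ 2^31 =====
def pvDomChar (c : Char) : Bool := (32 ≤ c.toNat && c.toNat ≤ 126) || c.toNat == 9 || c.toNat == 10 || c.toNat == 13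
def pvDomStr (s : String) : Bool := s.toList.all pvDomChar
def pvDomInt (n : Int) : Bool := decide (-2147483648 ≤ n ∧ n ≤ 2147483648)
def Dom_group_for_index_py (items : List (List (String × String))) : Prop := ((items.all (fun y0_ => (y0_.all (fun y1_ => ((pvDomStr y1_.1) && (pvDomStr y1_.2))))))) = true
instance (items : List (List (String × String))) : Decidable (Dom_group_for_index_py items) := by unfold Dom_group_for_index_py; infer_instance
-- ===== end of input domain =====

-- B replaces A's defaultdict-accumulate / per-group sort / final key-sort pipeline by a single
-- comprehension over the sorted distinct group keys, filtering and sorting each group directly (objective: simpler).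


-- ===== PORT A =====
-- item["source_path"] is ported as getD with default "" — Pre_ excludes items without that key (KeyError in Python).
def group_for_index_py (items : List (List (String × String))) : List (String × List (List (String × String))) :=
  let groups : PySem.Dict String (List (List (String × String))) :=
    items.foldl (fun g item =>
      let path := (PySem.Dict.mk item).getD "source_path" ""
      let parts := (PySem.Str.split? path "/").getD []   -- sep "/" ≠ "": split? is some here
      let group :=
        if PySem.Str.startswith path "engram/" && decide (2 ≤ parts.length) then
          "engram/" ++ PySem.List.pyGetD parts 1 ""
        else if PySem.Str.startswith path "plugins/engram-memory/" && decide (3 ≤ parts.length) then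
          "plugins/engram-memory/" ++ PySem.List.pyGetD parts 2 ""
        else "root"
      g.modify group [] (· ++ [item])) PySem.Dict.empty
  let sortedGroups : PySem.Dict String (List (List (String × String))) :=
    PySem.Dict.mk (groups.items.map (fun kv =>
      (kv.1, PySem.List.sorted kv.2 (fun item => (PySem.Dict.mk item).getD "source_path" "") false)))
  PySem.List.sorted sortedGroups.items (fun kv => kv.1) false

-- ===== PORT B =====
def pvGroupKey (item : List (String × String)) : String :=
  let path := (PySem.Dict.mk item).getD "source_path" ""
  let parts := (PySem.Str.split? path "/").getD []
  if PySem.Str.startswith path "engram/" && decide (2 ≤ parts.length) then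
    "engram/" ++ PySem.List.pyGetD parts 1 ""
  else if PySem.Str.startswith path "plugins/engram-memory/" && decide (3 ≤ parts.length) then
    "plugins/engram-memory/" ++ PySem.List.pyGetD parts 2 ""
  else "root"

def group_for_index_py_alt (items : List (List (String × String))) : List (String × List (List (String × String))) :=
  (PySem.List.sorted (PySem.Set.ofList (items.map pvGroupKey)) (fun k => k) false).map
    (fun key => (key,
      PySem.List.sorted (items.filter (fun item => pvGroupKey item == key))
        (fun item => (PySem.Dict.mk item).getD "source_path" "") false))

-- ===== PRECONDITION & SPEC =====
-- Pre_ excludes only items lacking a "source_path" key, on which the Python A raises KeyError.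
def Pre_group_for_index_py (items : List (List (String × String))) : Prop :=
  ∀ item ∈ items, "source_path" ∈ item.map Prod.fst
instance (items : List (List (String × String))) : Decidable (Pre_group_for_index_py items) := by unfold Pre_group_for_index_py; infer_instance
def pvWitness_group_for_index_py : (List (List (String × String))) :=
  [[("source_path", "engram/core/a.py")], [("source_path", "README.md")]]
def Spec_group_for_index_py (items : List (List (String × String))) (out : List (String × List (List (String × String)))) : Prop := out = group_for_index_py_alt items
instance (items : List (List (String × String))) (out : List (String × List (List (String × String)))) : Decidable (Spec_group_for_index_py items out) := by unfold Spec_group_for_index_py; infer_instance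

-- ===== CLAIM (what is proved, stated in full; the proofs are below) =====
def Claim_equal_group_for_index_py : Prop := ∀ (items : List (List (String × String))), Dom_group_for_index_py items → Pre_group_for_index_py items → Spec_group_for_index_py items (group_for_index_py items)

-- ===== LEMMAS AND PROOFS =====

def pvPathKey (item : List (String × String)) : String :=
  (PySem.Dict.mk item).getD "source_path" ""

-- A's grouping loop, named for the proofs.
def pvGroupsA (items : List (List (String × String))) : PySem.Dict String (List (List (String × String))) :=
  items.foldl (fun g item => g.modify (pvGroupKey item) [] (· ++ [item])) PySem.Dict.empty

lemma pvGroupsA_keys (items : List (List (String × String))) :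
    (pvGroupsA items).keys = PySem.Set.ofList (items.map pvGroupKey) := by
  unfold pvGroupsA
  rw [PySem.Dict.keys_foldl_modify_key items pvGroupKey [] (fun _ item => (· ++ [item]))]
  simp [PySem.Set.ofList_eq_foldl, PySem.Set.update, PySem.Dict.keys, PySem.Dict.empty]

lemma pvGroupsA_getD (items : List (List (String × String))) (k : String) :
    (pvGroupsA items).getD k [] = items.filter (fun item => pvGroupKey item == k) := by
  unfold pvGroupsA
  have h := PySem.Dict.getD_foldl_modify_append
    (items.map (fun item => (pvGroupKey item, item))) (PySem.Dict.empty) k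
  rw [List.foldl_map] at h
  simp only [h, List.filter_map, List.map_map]
  simp [Function.comp_def, PySem.Dict.getD_empty]

lemma pvGroupsA_items (items : List (List (String × String))) :
    (pvGroupsA items).items
      = (PySem.Set.ofList (items.map pvGroupKey)).map
          (fun k => (k, items.filter (fun item => pvGroupKey item == k))) := by
  rw [PySem.Dict.items_eq_map_keys (pvGroupsA items)
        (by rw [pvGroupsA_keys]; exact PySem.Set.nodup_ofList _) []]
  rw [pvGroupsA_keys]
  exact List.map_congr_left (fun k _ => by rw [pvGroupsA_getD])

-- sorting the per-key association list by its (distinct) keys = mapping over the sorted keys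
lemma pvSorted_map_fst {α : Type} (K : List String) (f : String → α)
    (hK : (PySem.List.sorted K (fun k => k) false).Pairwise (· < ·)) :
    PySem.List.sorted (K.map (fun k => (k, f k))) (fun kv => kv.1) false
      = (PySem.List.sorted K (fun k => k) false).map (fun k => (k, f k)) := by
  apply PySem.List.sorted_eq_of_perm_of_pairwise_lt
  · exact (PySem.List.sorted_perm K (fun k => k) false).map _
  · exact List.pairwise_map.mpr hK

theorem group_for_index_py_spec_aux (items : List (List (String × String))) :
    group_for_index_py items = group_for_index_py_alt items := by
  show PySem.List.sorted
      ((pvGroupsA items).items.map (fun kv => (kv.1, PySem.List.sorted kv.2 pvPathKey false)))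
      (fun kv => kv.1) false = _
  rw [pvGroupsA_items, List.map_map]
  simp only [Function.comp_def]
  rw [pvSorted_map_fst (PySem.Set.ofList (items.map pvGroupKey))
        (fun k => PySem.List.sorted (items.filter (fun item => pvGroupKey item == k)) pvPathKey false)
        (PySem.List.sorted_ofList_pairwise_lt _)]
  rfl

-- ===== VERDICT (by name: the statement is the Claim_ definition above) =====
theorem group_for_index_py_spec : Claim_equal_group_for_index_py := by
  intro items _ _
  exact group_for_index_py_spec_aux items
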